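-- pv_equiv track=rewrite | github.com/Rasbon99/coding-challenges | backstracking challenges/esercitazione_backtracking2.py | short_distance
-- ===== SOURCE A (Python) =====
-- def short_distance(slope, x, y, steps, nSteps, shortest):
--     resShortest = []
--     for i in range(nSteps):
--         nextX, nextY = steps[i]
--
--         if slope[x][y] >= slope[nextX][nextY]:
--             distance = abs(slope[x][y] - slope[nextX][nextY])
--
--             if distance < shortest:
--                 shortest = distance
--                 resShortest = [(nextX, nextY)]
--             elif distance == shortest:
--                 resShortest.append((nextX, nextY))
--
--     return resShortest
-- ===== SOURCE B (Python) =====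
-- def short_distance(slope, x, y, steps, nSteps, shortest):
--     # gather all downhill candidates as (distance, cell) in iteration order
--     cands = [(abs(slope[x][y] - slope[nx][ny]), (nx, ny))
--              for (nx, ny) in steps[:max(nSteps, 0)]
--              if slope[x][y] >= slope[nx][ny]]
--     if not cands:
--         return []
--     m = min(d for d, _ in cands)
--     if m > shortest:
--         return []
--     return [cell for d, cell in cands if d == m]
-- ===== Notes on version B (the rewrite author's own statement) =====
-- stated objective: simpler
-- what changed: A's single interleaved loop with a running minimum that resets/extends the result list is replaced by a gather-then-reduce-then-filter pipeline: build the list of downhill candidates (distance, cell) once, take the minimum distance, and keep the candidates achieving it (in order) when it does not exceed the initial shortest threshold.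
import Mathlib
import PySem

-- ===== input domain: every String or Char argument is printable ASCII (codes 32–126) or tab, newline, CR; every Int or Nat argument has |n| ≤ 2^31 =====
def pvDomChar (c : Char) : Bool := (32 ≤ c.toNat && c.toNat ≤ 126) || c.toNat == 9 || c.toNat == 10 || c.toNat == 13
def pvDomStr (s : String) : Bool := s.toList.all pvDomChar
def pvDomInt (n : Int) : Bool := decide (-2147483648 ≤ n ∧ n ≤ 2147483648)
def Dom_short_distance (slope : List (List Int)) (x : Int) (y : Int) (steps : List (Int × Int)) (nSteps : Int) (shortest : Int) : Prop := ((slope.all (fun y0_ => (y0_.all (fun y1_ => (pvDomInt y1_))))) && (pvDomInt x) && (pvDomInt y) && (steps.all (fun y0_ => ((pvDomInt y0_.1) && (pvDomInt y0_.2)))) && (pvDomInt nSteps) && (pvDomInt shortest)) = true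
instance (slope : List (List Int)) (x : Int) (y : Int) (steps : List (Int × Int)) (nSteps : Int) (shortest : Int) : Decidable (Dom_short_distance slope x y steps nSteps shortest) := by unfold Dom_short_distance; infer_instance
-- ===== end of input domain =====

-- B replaces A's interleaved running-minimum loop (reset/extend the result in place) by a
-- gather-candidates / take-minimum / filter pipeline; objective: simpler decomposition, same O(n) cost.

-- ===== PORT A =====
-- slope[a][b] under the Pre_ guarantee that both indices are in range (Python wraps negatives)
def pvCell (slope : List (List Int)) (a b : Int) : Int :=
  PySem.List.pyGetD (PySem.List.pyGetD slope a []) b 0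

-- the loop body of A: state (shortest, resShortest), one step cell nxy
def pvStepA (slope : List (List Int)) (x y : Int) (st : Int × List (Int × Int))
    (nxy : Int × Int) : Int × List (Int × Int) :=
  if pvCell slope x y ≥ pvCell slope nxy.1 nxy.2 then
    let distance := |pvCell slope x y - pvCell slope nxy.1 nxy.2|
    if distance < st.1 then (distance, [nxy])
    else if distance = st.1 then (st.1, st.2 ++ [nxy])
    else st
  else st

def short_distance (slope : List (List Int)) (x : Int) (y : Int) (steps : List (Int × Int)) (nSteps : Int) (shortest : Int) : List (Int × Int) :=
  ((PySem.List.pyRange 0 nSteps 1).foldl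
    (fun st i => pvStepA slope x y st (PySem.List.pyGetD steps i ((0 : Int), (0 : Int))))
    (shortest, ([] : List (Int × Int)))).2

-- ===== PORT B =====
-- one comprehension element of B: a downhill candidate (distance, cell), or skipped
def pvCand (slope : List (List Int)) (x y : Int) (p : Int × Int) : Option (Int × (Int × Int)) :=
  if pvCell slope x y ≥ pvCell slope p.1 p.2 then
    some (|pvCell slope x y - pvCell slope p.1 p.2|, p)
  else none

def short_distance_alt (slope : List (List Int)) (x : Int) (y : Int) (steps : List (Int × Int)) (nSteps : Int) (shortest : Int) : List (Int × Int) :=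
  let cands := (PySem.List.slice steps none (some (max nSteps 0))).filterMap (pvCand slope x y)
  if cands = [] then []
  else
    let m := (PySem.List.min? (cands.map Prod.fst) (fun d => d)).getD 0
    if m > shortest then []
    else (cands.filter (fun c => c.1 = m)).map Prod.snd

-- ===== PRECONDITION & SPEC =====
-- Pre_ excludes exactly the inputs where the Python A raises IndexError: an iteration count
-- past the end of steps, or an out-of-range (after negative wraparound) cell access.
def pvCellOk (slope : List (List Int)) (a b : Int) : Bool :=
  ((PySem.List.pyGet? slope a).bind (fun row => PySem.List.pyGet? row b)).isSome

def Pre_short_distance (slope : List (List Int)) (x : Int) (y : Int) (steps : List (Int × Int)) (nSteps : Int) (shortest : Int) : Prop :=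
  nSteps.toNat ≤ steps.length ∧ (0 < nSteps → pvCellOk slope x y = true) ∧
    ∀ p ∈ steps.take nSteps.toNat, pvCellOk slope p.1 p.2 = true

instance (slope : List (List Int)) (x : Int) (y : Int) (steps : List (Int × Int)) (nSteps : Int) (shortest : Int) : Decidable (Pre_short_distance slope x y steps nSteps shortest) := by unfold Pre_short_distance; infer_instance

def pvWitness_short_distance : List (List Int) × Int × Int × (List (Int × Int)) × Int × Int :=
  ([[3, 1], [2, 0]], 0, 0, [(0, 1), (1, 0), (1, 1)], 3, 5)

def Spec_short_distance (slope : List (List Int)) (x : Int) (y : Int) (steps : List (Int × Int)) (nSteps : Int) (shortest : Int) (out : List (Int × Int)) : Prop := out = short_distance_alt slope x y steps nSteps shortest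
instance (slope : List (List Int)) (x : Int) (y : Int) (steps : List (Int × Int)) (nSteps : Int) (shortest : Int) (out : List (Int × Int)) : Decidable (Spec_short_distance slope x y steps nSteps shortest out) := by unfold Spec_short_distance; infer_instance

-- ===== CLAIM (what is proved, stated in full; the proofs are below) =====
def Claim_equal_short_distance : Prop := ∀ (slope : List (List Int)) (x : Int) (y : Int) (steps : List (Int × Int)) (nSteps : Int) (shortest : Int), Dom_short_distance slope x y steps nSteps shortest → Pre_short_distance slope x y steps nSteps shortest → Spec_short_distance slope x y steps nSteps shortest (short_distance slope x y steps nSteps shortest)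


-- ===== LEMMAS AND PROOFS =====

-- candidates of B over an explicit prefix list, and the running minimum it induces
def pvCands (slope : List (List Int)) (x y : Int) (l : List (Int × Int)) : List (Int × (Int × Int)) :=
  l.filterMap (pvCand slope x y)

def pvM (slope : List (List Int)) (x y : Int) (l : List (Int × Int)) (sh : Int) : Int :=
  ((pvCands slope x y l).map Prod.fst).foldl min sh

lemma foldl_min_min (l : List Int) : ∀ a b : Int, l.foldl min (min a b) = min a (l.foldl min b) := by
  induction l with
  | nil => intro a b; rfl
  | cons c t ih =>
    intro a b
    simp only [List.foldl_cons]
    rw [min_assoc, ih]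

lemma foldl_min_le (l : List Int) : ∀ a : Int, l.foldl min a ≤ a := by
  induction l with
  | nil => intro a; exact le_refl a
  | cons c t ih =>
    intro a
    simp only [List.foldl_cons]
    exact le_trans (ih _) (min_le_left _ _)

lemma foldl_min_le_mem (l : List Int) : ∀ a : Int, ∀ d ∈ l, l.foldl min a ≤ d := by
  induction l with
  | nil => intro a d hd; cases hd
  | cons c t ih =>
    intro a d hd
    rcases List.mem_cons.mp hd with h | h
    · subst h
      simp only [List.foldl_cons]
      exact le_trans (foldl_min_le t _) (min_le_right _ _)
    · exact ih _ d h

-- characterization of A's loop: final shortest is the running min, final result is the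
-- candidates achieving it (prefixed by res when the minimum never improved on sh)
lemma loopA_char (slope : List (List Int)) (x y : Int) :
    ∀ (l : List (Int × Int)) (sh : Int) (res : List (Int × Int)),
      l.foldl (pvStepA slope x y) (sh, res)
        = (pvM slope x y l sh,
           (if pvM slope x y l sh = sh then res else [])
             ++ ((pvCands slope x y l).filter (fun c => c.1 = pvM slope x y l sh)).map Prod.snd) := by
  intro l
  induction l with
  | nil =>
    intro sh res
    simp [pvM, pvCands]
  | cons p t ih =>
    intro sh res
    by_cases hge : pvCell slope x y ≥ pvCell slope p.1 p.2
    · have hcands : pvCands slope x y (p :: t)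
          = (|pvCell slope x y - pvCell slope p.1 p.2|, p) :: pvCands slope x y t := by
        simp [pvCands, pvCand, hge]
      set d := |pvCell slope x y - pvCell slope p.1 p.2| with hd
      have hMle : pvM slope x y t d ≤ d := foldl_min_le _ _
      have hMexp : ∀ s : Int, pvM slope x y (p :: t) s
          = ((pvCands slope x y t).map Prod.fst).foldl min (min s d) := by
        intro s
        rw [pvM, hcands]
        simp only [List.map_cons, List.foldl_cons]
      have hstep : pvStepA slope x y (sh, res) p
          = (if d < sh then (d, [p])
             else if d = sh then (sh, res ++ [p]) else (sh, res)) := by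
        simp [pvStepA, hge, ← hd]
      rcases lt_trichotomy d sh with hlt | heq | hgt
      · -- d < sh : reset
        simp only [List.foldl_cons, hstep, if_pos hlt]
        rw [ih d [p]]
        have hMM : pvM slope x y (p :: t) sh = pvM slope x y t d := by
          rw [hMexp, min_eq_right (le_of_lt hlt)]; rfl
        have hnsh : pvM slope x y t d ≠ sh := ne_of_lt (lt_of_le_of_lt hMle hlt)
        rw [hcands]
        simp only [List.filter_cons, hMM, if_neg hnsh]
        by_cases hdm : d = pvM slope x y t d
        · rw [if_pos hdm.symm, if_pos (decide_eq_true hdm)]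
          simp
        · rw [if_neg (fun h => hdm h.symm),
              if_neg (show ¬ (decide (d = pvM slope x y t d) = true) by simpa using hdm)]
      · -- d = sh : append
        subst heq
        simp only [List.foldl_cons, hstep, lt_irrefl, if_false, if_true]
        rw [ih d (res ++ [p])]
        have hMM : pvM slope x y (p :: t) d = pvM slope x y t d := by
          rw [hMexp, min_self]; rfl
        rw [hcands]
        simp only [List.filter_cons, hMM]
        by_cases hsd : pvM slope x y t d = d
        · have hc : ((d, p).1 = pvM slope x y t d) := hsd.symm
          simp [hsd, List.append_assoc]
        · have hc : ¬ ((d, p).1 = pvM slope x y t d) := fun h => hsd h.symm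
          simp [hsd, hc]
      · -- d > sh : skip
        have h1 : ¬ d < sh := not_lt_of_gt hgt
        have h2 : ¬ d = sh := ne_of_gt hgt
        simp only [List.foldl_cons, hstep, if_neg h1, if_neg h2]
        rw [ih sh res]
        have hMM : pvM slope x y (p :: t) sh = pvM slope x y t sh := by
          rw [hMexp, min_eq_left (le_of_lt hgt)]; rfl
        have hne : ¬ ((d, p).1 = pvM slope x y t sh) := by
          have hle : pvM slope x y t sh ≤ sh := foldl_min_le _ _
          intro h
          simp only at h
          omega
        rw [hcands]
        simp only [List.filter_cons, hMM]
        simp [hne]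
    · -- not downhill : skipped by both
      have hcands : pvCands slope x y (p :: t) = pvCands slope x y t := by
        simp [pvCands, pvCand, hge]
      have hstep : pvStepA slope x y (sh, res) p = (sh, res) := by
        simp [pvStepA, hge]
      simp only [List.foldl_cons, hstep, pvM, hcands]
      exact ih sh res

-- under Pre_, A's index loop is the fold of pvStepA over steps.take nSteps.toNat
lemma loopA_take (slope : List (List Int)) (x y : Int) (steps : List (Int × Int))
    (nSteps : Int) (sh : Int) (hn : nSteps.toNat ≤ steps.length) :
    (PySem.List.pyRange 0 nSteps 1).foldl
        (fun st i => pvStepA slope x y st (PySem.List.pyGetD steps i ((0 : Int), (0 : Int))))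
        (sh, ([] : List (Int × Int)))
      = (steps.take nSteps.toNat).foldl (pvStepA slope x y) (sh, []) := by
  set l := steps.take nSteps.toNat with hl
  have hlen : l.length = nSteps.toNat := by
    rw [hl, List.length_take]; omega
  have hr : PySem.List.pyRange 0 nSteps 1 = PySem.List.pyRange 0 (l.length : Int) 1 := by
    rw [PySem.List.pyRange_one, PySem.List.pyRange_one, hlen]
    have he : (nSteps - 0).toNat = (((nSteps.toNat : Int)) - 0).toNat := by omega
    rw [he]
  rw [hr]
  have hcongr : (PySem.List.pyRange 0 (l.length : Int) 1).foldl
      (fun st i => pvStepA slope x y st (PySem.List.pyGetD steps i ((0 : Int), (0 : Int))))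
      (sh, ([] : List (Int × Int)))
      = (PySem.List.pyRange 0 (l.length : Int) 1).foldl
      (fun st i => pvStepA slope x y st (PySem.List.pyGetD l i ((0 : Int), (0 : Int))))
      (sh, ([] : List (Int × Int))) := by
    apply PySem.List.foldl_congr_mem
    intro acc i hi
    rcases PySem.List.mem_pyRange_one.mp hi with ⟨h0, h1⟩
    have hil : i.toNat < l.length := by omega
    have his : i.toNat < steps.length := by omega
    rw [PySem.List.pyGetD_eq_getElem steps ((0 : Int), (0 : Int)) h0 (by omega),
        PySem.List.pyGetD_eq_getElem l ((0 : Int), (0 : Int)) h0 (by omega)]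
    congr 1
    exact List.getElem_take.symm
  rw [hcongr]
  exact PySem.List.foldl_pyRange_zero_pyGetD' l ((0 : Int), (0 : Int)) (pvStepA slope x y) (sh, [])

-- ===== VERDICT (by name: the statement is the Claim_ definition above) =====
theorem short_distance_spec : Claim_equal_short_distance := by
  intro slope x y steps nSteps shortest _ hpre
  obtain ⟨hn, -, -⟩ := hpre
  unfold Spec_short_distance short_distance short_distance_alt
  rw [loopA_take slope x y steps nSteps shortest hn]
  rw [loopA_char slope x y (steps.take nSteps.toNat) shortest []]
  have hslice : PySem.List.slice steps none (some (max nSteps 0)) = steps.take nSteps.toNat := by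
    rw [PySem.List.slice_to steps (le_max_right nSteps 0)]
    congr 1
    omega
  rw [hslice]
  set l := steps.take nSteps.toNat with hl
  show ((if pvM slope x y l shortest = shortest then ([] : List (Int × Int)) else [])
          ++ ((pvCands slope x y l).filter (fun c => c.1 = pvM slope x y l shortest)).map Prod.snd)
        = _
  rcases hcs : l.filterMap (pvCand slope x y) with _ | ⟨c, t⟩
  · have : pvCands slope x y l = [] := hcs
    simp [this, pvM]
  · have hcands : pvCands slope x y l = c :: t := hcs
    have hmin : (PySem.List.min? ((c :: t).map Prod.fst) (fun d => d)).getD 0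
        = (t.map Prod.fst).foldl min c.1 := by
      simp only [List.map_cons]
      rw [PySem.List.min?_id_cons]
      rfl
    set m := (t.map Prod.fst).foldl min c.1 with hm
    have hM : pvM slope x y l shortest = min shortest m := by
      rw [pvM, hcands]
      simp only [List.map_cons, List.foldl_cons]
      rw [foldl_min_min]
    simp only [hcands, if_neg (List.cons_ne_nil c t), hmin]
    by_cases hms : m > shortest
    · -- every candidate distance exceeds shortest: both sides empty
      have hMs : pvM slope x y l shortest = shortest := by
        rw [hM]; exact min_eq_left (le_of_lt hms)
      have hfilter : (pvCands slope x y l).filter (fun c => c.1 = pvM slope x y l shortest) = [] := by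
        rw [List.filter_eq_nil_iff]
        intro a ha
        have hmem : a.1 ∈ (c :: t).map Prod.fst := by
          rw [← hcands]; exact List.mem_map_of_mem (by rwa [hcands] at ha ⊢)
        have : m ≤ a.1 := by
          simp only [List.map_cons] at hmem
          rcases List.mem_cons.mp hmem with h | h
          · rw [h]; exact foldl_min_le _ _
          · exact foldl_min_le_mem _ _ _ h
        simp only [hMs, decide_eq_true_eq]
        omega
      rw [hcands] at hfilter
      rw [hfilter, if_pos hms]
      simp
    · -- the minimum wins: both sides are the candidates at distance m
      have hms' : m ≤ shortest := le_of_not_gt hms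
      have hMs : pvM slope x y l shortest = m := by rw [hM]; exact min_eq_right hms'
      rw [hMs]
      simp [hms]
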